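-- pv_equiv track=rewrite | github.com/crowd4u/HACTAP-Framework | hactap/solvers/intersectional_cluster_cta.py | get_all_of_intersection
-- ===== SOURCE A (Python) =====
-- from typing import List
--
-- def get_all_of_intersection(A: List, B: List) -> List:
--     result = []
--     for a in A:
--         for b in B:
--             c = set(a).intersection(set(b))
--             if len(c) > 0:
--                 result.append(c)
--     return result
-- ===== SOURCE B (Python) =====
-- def get_all_of_intersection(A, B):
--     # inverted index: element -> list of indices j (increasing) of B-lists containing it
--     index = {}
--     for j, b in enumerate(B):
--         for e in dict.fromkeys(b):
--             index.setdefault(e, []).append(j)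
--     nB = len(B)
--     result = []
--     for a in A:
--         acc = [[] for _ in range(nB)]
--         for e in dict.fromkeys(a):
--             for j in index.get(e, []):
--                 acc[j].append(e)
--         for c in acc:
--             if c:
--                 result.append(set(c))
--     return result
-- ===== Notes on version B (the rewrite author's own statement) =====
-- stated objective: faster
-- what changed: Instead of building set(a) and set(b) and intersecting for every pair, B builds one inverted index from element to the indices of the B-lists containing it, then for each a accumulates the per-b intersections in a single pass over a's distinct elements and emits the nonempty ones in b-order.
import Mathlib
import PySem

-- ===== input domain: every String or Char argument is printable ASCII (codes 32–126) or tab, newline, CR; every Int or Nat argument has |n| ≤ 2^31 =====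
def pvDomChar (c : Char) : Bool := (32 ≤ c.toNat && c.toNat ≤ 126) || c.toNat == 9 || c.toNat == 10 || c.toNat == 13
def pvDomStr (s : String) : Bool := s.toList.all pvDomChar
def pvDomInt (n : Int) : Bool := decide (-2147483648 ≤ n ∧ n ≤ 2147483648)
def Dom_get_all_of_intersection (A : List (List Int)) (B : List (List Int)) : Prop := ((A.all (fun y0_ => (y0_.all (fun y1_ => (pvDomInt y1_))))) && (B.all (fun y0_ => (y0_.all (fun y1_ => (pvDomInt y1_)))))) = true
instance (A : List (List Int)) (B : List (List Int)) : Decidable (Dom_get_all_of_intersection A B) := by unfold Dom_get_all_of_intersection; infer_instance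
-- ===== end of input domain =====

-- B replaces A's per-pair set building with an inverted index from element to the B-lists containing it (measured faster).


-- ===== PORT A =====
def get_all_of_intersection (A : List (List Int)) (B : List (List Int)) : List (List Int) :=
  A.foldl (fun result a =>
    B.foldl (fun result b =>
      let c := PySem.Set.inter (PySem.Set.ofList a) (PySem.Set.ofList b)
      if PySem.Set.len c > 0 then result ++ [c] else result) result) []

-- ===== PORT B =====
-- inverted index: element -> list of indices j of the B-lists containing it ('for j, b in enumerate(B): for e in dict.fromkeys(b): index.setdefault(e, []).append(j)')
def pvIndex (B : List (List Int)) : PySem.Dict Int (List Int) :=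
  (PySem.List.enumerate B 0).foldl
    (fun index jb => (PySem.List.dedup jb.2).foldl
      (fun index e => index.modify e [] (· ++ [jb.1])) index)
    PySem.Dict.empty

def get_all_of_intersection_alt (A : List (List Int)) (B : List (List Int)) : List (List Int) :=
  let index := pvIndex B
  let nB : Int := PySem.List.len B
  A.foldl (fun result a =>
    let acc0 : List (List Int) := (PySem.List.pyRange 0 nB 1).map (fun _ => [])
    let acc := (PySem.List.dedup a).foldl
      (fun acc e => (index.getD e []).foldl
        (fun acc j => PySem.List.pySetD acc j (PySem.List.pyGetD acc j [] ++ [e])) acc) acc0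
    acc.foldl (fun result c => if c ≠ [] then result ++ [PySem.Set.ofList c] else result) result) []

-- ===== PRECONDITION & SPEC =====
def Spec_get_all_of_intersection (A : List (List Int)) (B : List (List Int)) (out : List (List Int)) : Prop := out = get_all_of_intersection_alt A B
instance (A : List (List Int)) (B : List (List Int)) (out : List (List Int)) : Decidable (Spec_get_all_of_intersection A B out) := by unfold Spec_get_all_of_intersection; infer_instance

-- ===== CLAIM (what is proved, stated in full; the proofs are below) =====
def Claim_equal_get_all_of_intersection : Prop := ∀ (A : List (List Int)) (B : List (List Int)), Dom_get_all_of_intersection A B → Spec_get_all_of_intersection A B (get_all_of_intersection A B)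

-- ===== LEMMAS AND PROOFS =====

-- the index list of an element, read off the enumeration of B
def pvJs (B : List (List Int)) (e : Int) : List Int :=
  ((PySem.List.enumerate B 0).filter (fun jb => decide (e ∈ jb.2))).map (·.1)

theorem pv_filter_beq_nodup (l : List Int) (e : Int) (h : l.Nodup) :
    l.filter (· == e) = if e ∈ l then [e] else [] := by
  induction l with
  | nil => simp
  | cons x l ih =>
    simp only [List.nodup_cons] at h
    by_cases hx : x = e
    · subst hx; simp [ih h.2, h.1]
    · simp [hx, ih h.2, Ne.symm hx]

theorem pv_inner_build (b : List Int) (j : Int) (d : PySem.Dict Int (List Int)) (e : Int) :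
    ((PySem.List.dedup b).foldl (fun index x => index.modify x [] (· ++ [j])) d).getD e []
      = d.getD e [] ++ (if e ∈ b then [j] else []) := by
  have h1 : (PySem.List.dedup b).foldl (fun index x => index.modify x [] (· ++ [j])) d
      = ((PySem.List.dedup b).map (fun x => (x, j))).foldl (fun index p => index.modify p.1 [] (· ++ [p.2])) d := by
    rw [List.foldl_map]
  rw [h1, PySem.Dict.getD_foldl_modify_append]
  congr 1
  rw [List.filter_map]
  rw [show ((fun p => p.1 == e) ∘ fun x => (x, j)) = (· == e) from rfl]
  rw [pv_filter_beq_nodup _ e (PySem.List.nodup_dedup b)]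
  by_cases he : e ∈ b
  · simp [he]
  · simp [he]

theorem pv_idx_go (e : Int) (L : List (List Int)) :
    ∀ (s : Int) (d : PySem.Dict Int (List Int)),
    ((PySem.List.enumerate L s).foldl
      (fun index jb => (PySem.List.dedup jb.2).foldl
        (fun index x => index.modify x [] (· ++ [jb.1])) index) d).getD e []
    = d.getD e [] ++ ((PySem.List.enumerate L s).filter (fun jb => decide (e ∈ jb.2))).map (·.1) := by
  induction L with
  | nil => intro s d; simp [PySem.List.enumerate_nil]
  | cons b L ih =>
    intro s d
    rw [PySem.List.enumerate_cons]
    simp only [List.foldl_cons, List.filter_cons]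
    rw [ih (s+1), pv_inner_build]
    by_cases he : e ∈ b
    · simp [he, List.append_assoc]
    · simp [he]

theorem pv_index_getD (B : List (List Int)) (e : Int) :
    (pvIndex B).getD e [] = pvJs B e := by
  unfold pvIndex pvJs
  rw [pv_idx_go]
  simp [PySem.Dict.getD_empty]

theorem pv_mem_js (B : List (List Int)) (e : Int) (m : Nat) (hm : m < B.length) :
    ((m : Int) ∈ pvJs B e ↔ e ∈ B.getD m []) := by
  unfold pvJs
  simp only [List.mem_map, List.mem_filter, PySem.List.mem_enumerate_iff]
  constructor
  · rintro ⟨p, ⟨⟨k, hk, rfl⟩, hp⟩, h1⟩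
    simp only [zero_add] at h1 hp
    have : k = m := by exact_mod_cast h1
    subst this
    simp only [decide_eq_true_eq] at hp
    rwa [List.getD_eq_getElem _ _ hm]
  · intro h
    refine ⟨((m:Int), B[m]), ⟨⟨m, hm, by simp⟩, ?_⟩, rfl⟩
    simp only [decide_eq_true_eq]
    rwa [List.getD_eq_getElem _ _ hm] at h

theorem pv_js_shape (B : List (List Int)) (e : Int) :
    ∀ j ∈ pvJs B e, ∃ k : Nat, j = (k : Int) ∧ k < B.length := by
  intro j hj
  unfold pvJs at hj
  simp only [List.mem_map, List.mem_filter, PySem.List.mem_enumerate_iff] at hj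
  obtain ⟨p, ⟨⟨k, hk, rfl⟩, _⟩, h1⟩ := hj
  exact ⟨k, by simp [← h1], hk⟩

theorem pv_js_nodup (B : List (List Int)) (e : Int) : (pvJs B e).Nodup := by
  unfold pvJs
  have h2 := (PySem.List.pairwise_lt_enumerate B (0 : Int)).filter (fun jb => decide (e ∈ jb.2))
  have h3 : (((PySem.List.enumerate B 0).filter (fun jb => decide (e ∈ jb.2))).map (·.1)).Pairwise (· < ·) := by
    rw [List.pairwise_map]; exact h2
  exact h3.nodup

theorem pv_setmany (x : Int) :
    ∀ (js : List Int) (v : List (List Int)), js.Nodup →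
    (∀ j ∈ js, ∃ k : Nat, j = (k : Int) ∧ k < v.length) →
    ((js.foldl (fun acc j => PySem.List.pySetD acc j (PySem.List.pyGetD acc j [] ++ [x])) v).length = v.length ∧
     ∀ m : Nat, m < v.length →
       (js.foldl (fun acc j => PySem.List.pySetD acc j (PySem.List.pyGetD acc j [] ++ [x])) v).getD m []
         = v.getD m [] ++ (if (m : Int) ∈ js then [x] else [])) := by
  intro js
  induction js with
  | nil => intro v _ _; simp
  | cons j js ih =>
    intro v hnd hran
    obtain ⟨k, rfl, hk⟩ := hran j (List.mem_cons_self)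
    simp only [List.nodup_cons] at hnd
    simp only [List.foldl_cons]
    set v' := PySem.List.pySetD v (k : Int) (PySem.List.pyGetD v (k : Int) [] ++ [x]) with hv'
    have hv'eq : v' = v.set k (v.getD k [] ++ [x]) := by
      rw [hv', PySem.List.pySetD_natCast, PySem.List.pyGetD_natCast]
    have hlen' : v'.length = v.length := by rw [hv'eq]; simp
    have hran' : ∀ j ∈ js, ∃ k : Nat, j = (k : Int) ∧ k < v'.length := by
      intro j hj; obtain ⟨k', h1, h2⟩ := hran j (List.mem_cons_of_mem _ hj)
      exact ⟨k', h1, by omega⟩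
    obtain ⟨ihlen, ihget⟩ := ih v' hnd.2 hran'
    constructor
    · rw [ihlen, hlen']
    · intro m hm
      rw [ihget m (by omega)]
      by_cases hmk : m = k
      · subst hmk
        have hnot : ((m : Int) ∉ js) := hnd.1
        have : v'.getD m [] = v.getD m [] ++ [x] := by
          rw [hv'eq, List.getD, List.getElem?_set, if_pos rfl, if_pos hk]
          simp [List.getD, List.getElem?_eq_getElem hk]
        rw [this, if_neg hnot, if_pos List.mem_cons_self, List.append_nil]
      · have hne : ((m : Int)) ≠ ((k : Int)) := by exact_mod_cast hmk
        have : v'.getD m [] = v.getD m [] := by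
          rw [hv'eq, List.getD, List.getElem?_set, if_neg (fun h => hmk h.symm)]
          rfl
        rw [this]
        by_cases hmj : (m:Int) ∈ js
        · rw [if_pos hmj, if_pos (List.mem_cons_of_mem _ hmj)]
        · rw [if_neg hmj, if_neg (by simp [List.mem_cons, hne, hmj])]

theorem pv_accloop (B : List (List Int)) :
    ∀ (p : List Int) (v : List (List Int)), v.length = B.length →
    ((p.foldl (fun acc e => ((pvIndex B).getD e []).foldl
        (fun acc j => PySem.List.pySetD acc j (PySem.List.pyGetD acc j [] ++ [e])) acc) v).length = B.length ∧
     ∀ m : Nat, m < B.length →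
       (p.foldl (fun acc e => ((pvIndex B).getD e []).foldl
          (fun acc j => PySem.List.pySetD acc j (PySem.List.pyGetD acc j [] ++ [e])) acc) v).getD m []
         = v.getD m [] ++ p.filter (fun e => decide (e ∈ B.getD m []))) := by
  intro p
  induction p with
  | nil => intro v hv; simp [hv]
  | cons e p ih =>
    intro v hv
    simp only [List.foldl_cons]
    rw [pv_index_getD]
    have hset := pv_setmany e (pvJs B e) v (pv_js_nodup B e)
      (by intro j hj; obtain ⟨k, h1, h2⟩ := pv_js_shape B e j hj; exact ⟨k, h1, by omega⟩)
    set v' := (pvJs B e).foldl (fun acc j => PySem.List.pySetD acc j (PySem.List.pyGetD acc j [] ++ [e])) v with hv'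
    obtain ⟨hlen', hget'⟩ := hset
    obtain ⟨ihlen, ihget⟩ := ih v' (by omega)
    refine ⟨ihlen, ?_⟩
    intro m hm
    rw [ihget m hm, hget' m (by omega), List.filter_cons]
    by_cases he : e ∈ B.getD m []
    · rw [if_pos ((pv_mem_js B e m hm).mpr he), if_pos (decide_eq_true he), List.append_assoc]
      rfl
    · rw [if_neg (fun h => he ((pv_mem_js B e m hm).mp h)),
        if_neg (by simp only [decide_eq_true_eq]; exact he), List.append_nil]

theorem pv_acc_eq_map (B : List (List Int)) (a : List Int) :
    ((PySem.List.dedup a).foldl (fun acc e => ((pvIndex B).getD e []).foldl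
        (fun acc j => PySem.List.pySetD acc j (PySem.List.pyGetD acc j [] ++ [e])) acc)
      ((PySem.List.pyRange 0 (PySem.List.len B) 1).map (fun _ => [])))
    = B.map (fun b => (PySem.List.dedup a).filter (fun e => decide (e ∈ b))) := by
  have h0 : ((PySem.List.pyRange 0 (PySem.List.len B) 1).map (fun _ => ([] : List Int))).length = B.length := by
    rw [List.length_map, PySem.List.length_pyRange_one, PySem.List.len_eq]
    omega
  obtain ⟨hlen, hget⟩ := pv_accloop B (PySem.List.dedup a) _ h0
  apply List.ext_getElem
  · rw [List.length_map, hlen]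
  · intro m hm1 hm2
    have hmB : m < B.length := by rw [hlen] at hm1; exact hm1
    have h1 := hget m hmB
    rw [List.getD_eq_getElem _ _ hm1] at h1
    have hz : (((PySem.List.pyRange 0 (PySem.List.len B) 1).map (fun _ => ([] : List Int))).getD m []) = [] := by
      rw [List.getD_eq_getElem _ _ (by rw [h0]; exact hmB)]
      simp
    rw [hz, List.nil_append] at h1
    rw [h1, List.getElem_map]
    congr 1
    rw [List.getD_eq_getElem _ _ hmB]

theorem pv_inter_eq (a b : List Int) :
    PySem.Set.inter (PySem.Set.ofList a) (PySem.Set.ofList b)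
      = (PySem.List.dedup a).filter (fun e => decide (e ∈ b)) := by
  have h : PySem.Set.inter (PySem.Set.ofList a) (PySem.Set.ofList b)
      = (PySem.List.dedup a).filter (fun e => PySem.Set.contains (PySem.Set.ofList b) e) := rfl
  rw [h]
  apply List.filter_congr
  intro x _
  simp [PySem.Set.contains_eq_listContains]

theorem pv_per_a (B : List (List Int)) (a : List Int) (r : List (List Int)) :
    (B.foldl (fun result b =>
      let c := PySem.Set.inter (PySem.Set.ofList a) (PySem.Set.ofList b)
      if PySem.Set.len c > 0 then result ++ [c] else result) r)
    = ((B.map (fun b => (PySem.List.dedup a).filter (fun e => decide (e ∈ b)))).foldl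
        (fun result c => if c ≠ [] then result ++ [PySem.Set.ofList c] else result) r) := by
  rw [List.foldl_map]
  have hstep : (fun (result : List (List Int)) (b : List Int) =>
      let c := PySem.Set.inter (PySem.Set.ofList a) (PySem.Set.ofList b)
      if PySem.Set.len c > 0 then result ++ [c] else result)
    = (fun result b =>
        if (PySem.List.dedup a).filter (fun e => decide (e ∈ b)) ≠ [] then
          result ++ [PySem.Set.ofList ((PySem.List.dedup a).filter (fun e => decide (e ∈ b)))]
        else result) := by
    funext r b
    simp only [pv_inter_eq]
    have hnodup : ((PySem.List.dedup a).filter (fun e => decide (e ∈ b))).Nodup :=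
      (PySem.List.nodup_dedup a).filter _
    rw [PySem.Set.ofList_eq_self_of_nodup _ hnodup]
    by_cases hc : (PySem.List.dedup a).filter (fun e => decide (e ∈ b)) = []
    · simp [PySem.Set.len]
    · have hpos : PySem.Set.len ((PySem.List.dedup a).filter (fun e => decide (e ∈ b))) > 0 := by
        have h := List.length_pos_of_ne_nil hc
        simp only [PySem.Set.len, gt_iff_lt]
        exact_mod_cast h
      rw [if_pos hpos, if_pos hc]
  rw [hstep]

-- ===== VERDICT (by name: the statement is the Claim_ definition above) =====
theorem get_all_of_intersection_spec : Claim_equal_get_all_of_intersection := by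
  intro A B _
  unfold Spec_get_all_of_intersection get_all_of_intersection get_all_of_intersection_alt
  show A.foldl _ [] = A.foldl (fun result a =>
      ((PySem.List.dedup a).foldl (fun acc e => ((pvIndex B).getD e []).foldl
        (fun acc j => PySem.List.pySetD acc j (PySem.List.pyGetD acc j [] ++ [e])) acc)
        ((PySem.List.pyRange 0 (PySem.List.len B) 1).map (fun _ => []))).foldl
        (fun result c => if c ≠ [] then result ++ [PySem.Set.ofList c] else result) result) []
  have hstep : (fun (result : List (List Int)) (a : List Int) =>
      B.foldl (fun result b =>
        let c := PySem.Set.inter (PySem.Set.ofList a) (PySem.Set.ofList b)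
        if PySem.Set.len c > 0 then result ++ [c] else result) result)
    = (fun result a =>
        ((PySem.List.dedup a).foldl (fun acc e => ((pvIndex B).getD e []).foldl
          (fun acc j => PySem.List.pySetD acc j (PySem.List.pyGetD acc j [] ++ [e])) acc)
          ((PySem.List.pyRange 0 (PySem.List.len B) 1).map (fun _ => []))).foldl
          (fun result c => if c ≠ [] then result ++ [PySem.Set.ofList c] else result) result) := by
    funext r a
    rw [pv_acc_eq_map, pv_per_a]
  rw [hstep]
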